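-- pv_equiv track=rewrite | github.com/marataya/python_algos | ozon_contest/highload.py | check_if_correct
-- ===== SOURCE A (Python) =====
-- def check_if_correct(sequence: str) -> bool:
--     stack = []
--     for c in sequence:
--         if c == 'M':
--             if stack and stack[-1] not in ('C', 'D'):
--                 return False
--             stack.append(c)
--         elif c == 'R':
--             if not stack or stack[-1] != 'M':
--                 return False
--             stack.append(c)
--         elif c == 'C':
--             if not stack or stack[-1] not in ('M', 'R'):
--                 return False
--             # while stack is not None or stack[-1] != "M":
--             #     stack.pop()
--             stack.append(c)
--         elif c == 'D':
--             if not stack or stack[-1] not in ('M', 'R'):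
--                 return False
--             # while stack is not None and stack[-1] != "M":
--             #     stack.pop()
--             stack.append(c)
--     return len(stack) == 0 or stack[-1] == 'D'
-- ===== SOURCE B (Python) =====
-- def check_if_correct(sequence: str) -> bool:
--     # Stage 1: keep only the relevant characters (everything else is ignored).
--     f = ''.join(c for c in sequence if c in 'MRCD')
--     if not f:
--         return True
--     # Stage 2: valid sequences are blocks M R? (C|D), the last one ending in D.
--     # Splitting on 'M' must give a leading '' and between-M segments from a
--     # fixed 4-element vocabulary, with the final segment ending in 'D'.
--     parts = f.split('M')
--     return (parts[0] == ''
--             and all(p in ('C', 'D', 'RC', 'RD') for p in parts[1:])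
--             and parts[-1].endswith('D'))
-- ===== Notes on version B (the rewrite author's own statement) =====
-- stated objective: faster
-- what changed: Replaces the per-character stack/state-machine loop with a two-stage recognizer: filter to the MRCD alphabet, split the filtered string on the block-opening letter, and check every segment against the fixed vocabulary {C,D,RC,RD} with the final segment required to end in a delete action (empty filtered string accepted).
import Mathlib
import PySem

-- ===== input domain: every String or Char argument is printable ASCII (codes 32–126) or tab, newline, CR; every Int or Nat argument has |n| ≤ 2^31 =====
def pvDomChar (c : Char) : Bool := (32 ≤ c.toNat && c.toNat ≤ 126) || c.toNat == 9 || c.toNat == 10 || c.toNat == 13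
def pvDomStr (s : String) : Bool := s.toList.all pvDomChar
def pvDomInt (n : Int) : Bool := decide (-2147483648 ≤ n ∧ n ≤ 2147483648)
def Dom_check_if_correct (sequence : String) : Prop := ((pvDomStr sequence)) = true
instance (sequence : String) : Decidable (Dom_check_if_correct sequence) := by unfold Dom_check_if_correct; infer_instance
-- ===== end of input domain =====

-- B replaces A's per-character stack machine by a two-stage recognizer:
-- filter to the MRCD alphabet, split on 'M', check segments against {C,D,RC,RD}
-- with the last segment ending in 'D' (measurably faster: the per-character Python
-- loop is replaced by C-level split and tuple-membership operations).

-- ===== PORT A =====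
-- the loop of A: `stack` is appended to, `stack[-1]` = getLast?; early `return False` = false
def check_if_correct_go (stack : List Char) : List Char → Bool
  | [] => stack.length == 0 || stack.getLast? == some 'D'
  | c :: cs =>
    if c = 'M' then
      if stack ≠ [] ∧ ¬(stack.getLast? = some 'C' ∨ stack.getLast? = some 'D') then false
      else check_if_correct_go (stack ++ [c]) cs
    else if c = 'R' then
      if stack = [] ∨ stack.getLast? ≠ some 'M' then false
      else check_if_correct_go (stack ++ [c]) cs
    else if c = 'C' then
      if stack = [] ∨ ¬(stack.getLast? = some 'M' ∨ stack.getLast? = some 'R') then false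
      else check_if_correct_go (stack ++ [c]) cs
    else if c = 'D' then
      if stack = [] ∨ ¬(stack.getLast? = some 'M' ∨ stack.getLast? = some 'R') then false
      else check_if_correct_go (stack ++ [c]) cs
    else check_if_correct_go stack cs

def check_if_correct (sequence : String) : Bool :=
  check_if_correct_go [] sequence.toList

-- ===== PORT B =====
-- `c in 'MRCD'` of Source B
def isMRCD (c : Char) : Bool := c = 'M' || c = 'R' || c = 'C' || c = 'D'

-- hand port of Python's str.split with the one-character separator 'M'
-- (exact on lists of chars: keeps empty segments; '' splits to ['']).
def splitM : List Char → List (List Char)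
  | [] => [[]]
  | c :: cs =>
    if c = 'M' then [] :: splitM cs
    else
      match splitM cs with
      | [] => [[c]]          -- unreachable: splitM never returns []
      | p :: ps => (c :: p) :: ps

-- `p in ('C', 'D', 'RC', 'RD')` of Source B
def inVocab (p : List Char) : Bool :=
  p = ['C'] || p = ['D'] || p = ['R', 'C'] || p = ['R', 'D']

-- `p.endswith('D')`
def endsD (p : List Char) : Bool := p.getLast? = some 'D'

def check_if_correct_alt (sequence : String) : Bool :=
  let f := sequence.toList.filter isMRCD
  if f = [] then true
  else
    match splitM f with
    | [] => false            -- unreachable: splitM never returns []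
    | p0 :: rest =>
      p0 = ([] : List Char) && rest.all inVocab && endsD ((p0 :: rest).getLast (by simp))

-- ===== PRECONDITION & SPEC =====
def Spec_check_if_correct (sequence : String) (out : Bool) : Prop := out = check_if_correct_alt sequence
instance (sequence : String) (out : Bool) : Decidable (Spec_check_if_correct sequence out) := by unfold Spec_check_if_correct; infer_instance

-- ===== CLAIM (what is proved, stated in full; the proofs are below) =====
def Claim_equal_check_if_correct : Prop := ∀ (sequence : String), Dom_check_if_correct sequence → Spec_check_if_correct sequence (check_if_correct sequence)

-- ===== LEMMAS AND PROOFS =====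

def goT (top : Option Char) : List Char → Bool
  | [] => top = none || top = some 'D'
  | c :: cs =>
    if c = 'M' then
      if top ≠ none ∧ ¬(top = some 'C' ∨ top = some 'D') then false
      else goT (some 'M') cs
    else if c = 'R' then
      if top = none ∨ top ≠ some 'M' then false
      else goT (some 'R') cs
    else if c = 'C' then
      if top = none ∨ ¬(top = some 'M' ∨ top = some 'R') then false
      else goT (some 'C') cs
    else if c = 'D' then
      if top = none ∨ ¬(top = some 'M' ∨ top = some 'R') then false
      else goT (some 'D') cs
    else goT top cs

theorem go_eq_goT (cs : List Char) : ∀ (stack : List Char),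
    check_if_correct_go stack cs = goT stack.getLast? cs := by
  induction cs with
  | nil =>
    intro stack
    cases stack <;>
      simp only [check_if_correct_go, goT, List.getLast?_nil, List.getLast?_eq_none_iff] <;>
      first
        | rfl
        | (rename_i h t; rcases hl : (h :: t).getLast? with _ | d
           · simp at hl
           · by_cases hd : d = 'D' <;> simp [hd])
  | cons c cs ih =>
    intro stack
    by_cases h1 : stack = []
    · subst h1
      simp only [check_if_correct_go, goT, List.getLast?_nil]
      split_ifs <;> simp_all
    · have h2 : stack.getLast? ≠ none := by
        simpa [List.getLast?_eq_none_iff] using h1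
      simp only [check_if_correct_go, goT]
      split_ifs <;> simp_all

theorem goT_filter (cs : List Char) : ∀ (top : Option Char),
    goT top cs = goT top (cs.filter isMRCD) := by
  induction cs with
  | nil => intro top; rfl
  | cons c cs ih =>
    intro top
    by_cases h : isMRCD c = true
    · have hcons : (c :: cs).filter isMRCD = c :: cs.filter isMRCD := by
        simp [h]
      rw [hcons]
      simp only [goT]
      split_ifs <;> simp [ih]
    · have : (c :: cs).filter isMRCD = cs.filter isMRCD := by
        simp [h]
      rw [this, ← ih]
      have hM : ¬ c = 'M' := by rintro rfl; simp [isMRCD] at h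
      have hR : ¬ c = 'R' := by rintro rfl; simp [isMRCD] at h
      have hC : ¬ c = 'C' := by rintro rfl; simp [isMRCD] at h
      have hD : ¬ c = 'D' := by rintro rfl; simp [isMRCD] at h
      simp [goT, hM, hR, hC, hD]

theorem splitM_ne_nil (t : List Char) : splitM t ≠ [] := by
  cases t with
  | nil => simp [splitM]
  | cons c cs =>
    simp only [splitM]
    split_ifs
    · simp
    · cases splitM cs <;> simp

def good : List (List Char) → Bool
  | [] => false
  | [p] => inVocab p && endsD p
  | p :: q :: qs => inVocab p && good (q :: qs)

def goodR : List (List Char) → Bool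
  | [] => false
  | p :: ps => good (('R' :: p) :: ps)

def ECD (c : Char) : List Char → Bool
  | [] => c == 'D'
  | d :: cs => if d = 'M' then good (splitM cs) else false

theorem splitM_M (cs : List Char) : splitM ('M' :: cs) = [] :: splitM cs := by
  simp [splitM]

theorem splitM_cons (c : Char) (cs p : List Char) (ps : List (List Char))
    (h : ¬ c = 'M') (hs : splitM cs = p :: ps) : splitM (c :: cs) = (c :: p) :: ps := by
  simp [splitM, h, hs]

theorem good_cons_false (p : List Char) (ps : List (List Char)) (h : inVocab p = false) :
    good (p :: ps) = false := by
  cases ps <;> simp [good, h]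

theorem exists_split (cs : List Char) : ∃ p ps, splitM cs = p :: ps := by
  rcases hs : splitM cs with _ | ⟨p, ps⟩
  · exact absurd hs (splitM_ne_nil cs)
  · exact ⟨p, ps, rfl⟩

theorem good_cons_cons (p q : List Char) (qs : List (List Char)) :
    good (p :: q :: qs) = (inVocab p && good (q :: qs)) := rfl

-- ECD c cs = good of the split of (c :: cs), for c ∈ {C, D}
theorem L1 (c : Char) (hc : c = 'C' ∨ c = 'D') (cs : List Char) :
    good (splitM (c :: cs)) = ECD c cs := by
  have hcM : ¬ c = 'M' := by rcases hc with rfl | rfl <;> decide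
  cases cs with
  | nil =>
    have h1 : splitM [c] = [[c]] := by simp [splitM, hcM]
    rw [h1]
    rcases hc with rfl | rfl <;> rfl
  | cons d cs2 =>
    by_cases hd : d = 'M'
    · subst hd
      obtain ⟨q, qs, hq⟩ := exists_split cs2
      rw [splitM_cons c ('M'::cs2) [] (splitM cs2) hcM (splitM_M cs2), hq,
        good_cons_cons]
      have : inVocab [c] = true := by rcases hc with rfl | rfl <;> decide
      simp [this, ECD, hq]
    · obtain ⟨q, qs, hq⟩ := exists_split cs2
      rw [splitM_cons c (d::cs2) (d::q) qs hcM (splitM_cons d cs2 q qs hd hq)]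
      have hv : inVocab (c :: d :: q) = false := by
        rcases hc with rfl | rfl <;> simp [inVocab]
      rw [good_cons_false _ _ hv]
      simp [ECD, hd]

-- same with the pending 'R' prefixed to the current segment
theorem L2 (c : Char) (hc : c = 'C' ∨ c = 'D') (cs p : List Char) (ps : List (List Char))
    (hs : splitM cs = p :: ps) :
    good (('R' :: c :: p) :: ps) = ECD c cs := by
  cases cs with
  | nil =>
    simp only [splitM] at hs
    obtain ⟨rfl, rfl⟩ : p = [] ∧ ps = [] := by simpa using hs.symm
    rcases hc with rfl | rfl <;> rfl
  | cons d cs2 =>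
    by_cases hd : d = 'M'
    · subst hd
      rw [splitM_M] at hs
      obtain ⟨rfl, hps⟩ : p = [] ∧ ps = splitM cs2 := by
        constructor <;> [exact (List.cons.inj hs).1.symm; exact (List.cons.inj hs).2.symm]
      obtain ⟨q, qs, hq⟩ := exists_split cs2
      rw [hps, hq, good_cons_cons]
      have : inVocab ['R', c] = true := by rcases hc with rfl | rfl <;> decide
      simp [this, ECD, hq]
    · obtain ⟨q, qs, hq⟩ := exists_split cs2
      rw [splitM_cons d cs2 q qs hd hq] at hs
      obtain ⟨rfl, rfl⟩ : p = d :: q ∧ ps = qs := by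
        constructor <;> [exact (List.cons.inj hs).1.symm; exact (List.cons.inj hs).2.symm]
      have hv : inVocab ('R' :: c :: d :: q) = false := by
        rcases hc with rfl | rfl <;> simp [inVocab]
      rw [good_cons_false _ _ hv]
      simp [ECD, hd]

theorem goT_states : ∀ (n : Nat) (t : List Char), t.length ≤ n → (∀ c ∈ t, isMRCD c = true) →
    (goT (some 'M') t = good (splitM t)) ∧
    (goT (some 'R') t = goodR (splitM t)) ∧
    (∀ c, (c = 'C' ∨ c = 'D') → goT (some c) t = ECD c t) := by
  intro n
  induction n with
  | zero =>
    intro t ht _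
    have h0 : t = [] := by cases t <;> simp_all
    subst h0
    refine ⟨by decide, by decide, ?_⟩
    rintro c (rfl | rfl) <;> decide
  | succ n ih =>
    intro t ht hf
    cases t with
    | nil =>
      refine ⟨by decide, by decide, ?_⟩
      rintro c (rfl | rfl) <;> decide
    | cons c cs =>
      have hlen : cs.length ≤ n := by simpa using Nat.lt_succ_iff.mp (Nat.lt_of_lt_of_le (by simp) ht)
      have hfcs : ∀ x ∈ cs, isMRCD x = true := fun x hx => hf x (List.mem_cons_of_mem _ hx)
      obtain ⟨ihM, ihR, ihCD⟩ := ih cs hlen hfcs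
      have hc : c = 'M' ∨ c = 'R' ∨ c = 'C' ∨ c = 'D' := by
        have := hf c (List.mem_cons_self)
        simp [isMRCD] at this
        tauto
      obtain ⟨p, ps, hs⟩ := exists_split cs
      rcases hc with rfl | rfl | rfl | rfl
      · -- c = 'M'
        have hbad : good ([] :: p :: ps) = false := good_cons_false _ _ (by decide)
        refine ⟨?_, ?_, ?_⟩
        · rw [splitM_M, hs, hbad]; simp [goT]
        · rw [splitM_M, hs]
          simp [goT, goodR, good_cons_false _ _ (show inVocab ['R'] = false by decide)]
        · rintro d (rfl | rfl) <;> simp [goT, ECD, ihM]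
      · -- c = 'R'
        refine ⟨?_, ?_, ?_⟩
        · rw [splitM_cons 'R' cs p ps (by decide) hs]
          simpa [goT, goodR, hs] using ihR
        · rw [splitM_cons 'R' cs p ps (by decide) hs]
          simp [goT, goodR,
            good_cons_false ('R'::'R'::p) ps (by simp [inVocab])]
        · rintro d (rfl | rfl) <;> simp [goT, ECD]
      · -- c = 'C'
        refine ⟨?_, ?_, ?_⟩
        · rw [L1 'C' (Or.inl rfl) cs]
          simpa [goT] using ihCD 'C' (Or.inl rfl)
        · rw [splitM_cons 'C' cs p ps (by decide) hs]
          simp only [goodR]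
          rw [L2 'C' (Or.inl rfl) cs p ps hs]
          simpa [goT] using ihCD 'C' (Or.inl rfl)
        · rintro d (rfl | rfl) <;> simp [goT, ECD]
      · -- c = 'D'
        refine ⟨?_, ?_, ?_⟩
        · rw [L1 'D' (Or.inr rfl) cs]
          simpa [goT] using ihCD 'D' (Or.inr rfl)
        · rw [splitM_cons 'D' cs p ps (by decide) hs]
          simp only [goodR]
          rw [L2 'D' (Or.inr rfl) cs p ps hs]
          simpa [goT] using ihCD 'D' (Or.inr rfl)
        · rintro d (rfl | rfl) <;> simp [goT, ECD]

theorem getLast_getD (l : List (List Char)) (h : l ≠ []) : l.getLast h = l.getLast?.getD [] := by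
  simp [List.getLast?_eq_some_getLast h]

theorem good_char : ∀ (qs : List (List Char)), qs ≠ [] →
    good qs = (qs.all inVocab && endsD (qs.getLast?.getD [])) := by
  intro qs
  induction qs with
  | nil => intro h; simp at h
  | cons q qs ih =>
    intro _
    cases qs with
    | nil => simp [good]
    | cons q2 qs2 =>
      rw [good_cons_cons, ih (by simp), List.getLast?_cons_cons]
      simp [Bool.and_assoc]

def Spec0 (f : List Char) : Bool :=
  if f = [] then true
  else
    match splitM f with
    | [] => false
    | p0 :: rest =>
      p0 = ([] : List Char) && rest.all inVocab && endsD ((p0 :: rest).getLast (by simp))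

theorem goT_none_spec0 (f : List Char) (hf : ∀ c ∈ f, isMRCD c = true) :
    goT none f = Spec0 f := by
  cases f with
  | nil => decide
  | cons c cs =>
    have hfcs : ∀ x ∈ cs, isMRCD x = true := fun x hx => hf x (List.mem_cons_of_mem _ hx)
    have hc : c = 'M' ∨ c = 'R' ∨ c = 'C' ∨ c = 'D' := by
      have := hf c (List.mem_cons_self)
      simp [isMRCD] at this
      tauto
    obtain ⟨ihM, -, -⟩ := goT_states cs.length cs le_rfl hfcs
    obtain ⟨q, qs, hq⟩ := exists_split cs
    rcases hc with rfl | rfl | rfl | rfl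
    · -- 'M'
      have hL : goT none ('M' :: cs) = good (splitM cs) := by
        simpa [goT] using ihM
      rw [hL, hq]
      simp [Spec0, splitM_M, hq, good_char (q :: qs) (by simp), getLast_getD]
    · simp [goT, Spec0, splitM_cons 'R' cs q qs (by decide) hq]
    · simp [goT, Spec0, splitM_cons 'C' cs q qs (by decide) hq]
    · simp [goT, Spec0, splitM_cons 'D' cs q qs (by decide) hq]

-- ===== VERDICT (by name: the statement is the Claim_ definition above) =====
theorem check_if_correct_spec : Claim_equal_check_if_correct := by
  intro s _
  unfold Spec_check_if_correct
  have halt : check_if_correct_alt s = Spec0 (s.toList.filter isMRCD) := rfl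
  rw [halt]
  unfold check_if_correct
  rw [go_eq_goT]
  simp only [List.getLast?_nil]
  rw [goT_filter]
  exact goT_none_spec0 _ (fun c hc => (List.mem_filter.mp hc).2)
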